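-- pv_equiv track=rewrite | github.com/SharinaS/Interview_Problems_and_Solutions | Rooks_on_chessboard.py | rookSafety
-- ===== SOURCE A (Python) =====
-- def rookSafety(board):
--     n = len(board)
--
--     for row_i in range(n): #0 1 2
--         row_count = 0 #variable to keep track of rooks seen so far
--         for col_i in range(n): # go over each item in the row
--             row_count += board[row_i][col_i] #count the # of rooks in each row
--         if row_count > 1: # at the end of this for loop, if row count is > 1, there are multiple rooks in this row.
--             return False #indicates these rooks will be able to attack each other.
--
--     for col_i in range(n): #check each column index
--         col_count = 0 #initialize col_count to zero.
--         for row_i in range(n):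
--             col_count += board[row_i][col_i]
--         if col_count > 1:
--             return False
--
--     return True #if program gets to this line, it means none of the rooks are able to attack each other, whether via rows or by columns
-- ===== SOURCE B (Python) =====
-- def rookSafety(board):
--     n = len(board)
--     col_counts = [0] * n
--     for row in board:
--         row_count = 0
--         for col_i in range(n):
--             v = row[col_i]
--             row_count += v
--             col_counts[col_i] += v
--         if row_count > 1:
--             return False
--     return all(c <= 1 for c in col_counts)
-- ===== Notes on version B (the rewrite author's own statement) =====
-- stated objective: simpler
-- what changed: B makes a single pass over the rows, tallying column sums into a col_counts list while checking each row sum inline, instead of A's second full n*n re-scan of the board for columns.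
-- outside the precondition, e.g. on rookSafety([[2, 0], [0]]): A returns False, B returns False
import Mathlib
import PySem

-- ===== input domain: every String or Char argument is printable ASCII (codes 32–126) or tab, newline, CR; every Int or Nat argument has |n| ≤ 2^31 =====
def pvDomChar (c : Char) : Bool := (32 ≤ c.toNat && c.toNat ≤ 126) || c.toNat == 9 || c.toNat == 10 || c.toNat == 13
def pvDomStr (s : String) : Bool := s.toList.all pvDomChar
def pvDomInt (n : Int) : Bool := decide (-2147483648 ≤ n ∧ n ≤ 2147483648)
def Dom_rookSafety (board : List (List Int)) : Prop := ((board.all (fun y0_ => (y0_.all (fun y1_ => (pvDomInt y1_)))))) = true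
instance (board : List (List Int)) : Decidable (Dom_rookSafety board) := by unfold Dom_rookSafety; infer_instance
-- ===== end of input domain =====

-- B replaces A's second full board scan for columns by column tallies maintained
-- during the single row pass (objective: simpler, one traversal instead of two).

-- ===== PORT A =====
-- board[row_i][col_i]: both indices are nonnegative and in range under Pre_, so
-- Python indexing is exactly List.getD here.
def pvRowSumA (row : List Int) (n : Nat) : Int :=
  (List.range n).foldl (fun acc c => acc + row.getD c 0) 0

def pvColSumA (board : List (List Int)) (n : Nat) (c : Nat) : Int :=
  (List.range n).foldl (fun acc i => acc + (board.getD i []).getD c 0) 0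

-- first for-loop of A, with its early `return False`
def pvRowsA (board : List (List Int)) (n : Nat) : List Nat → Bool
  | [] => true
  | i :: rest => if pvRowSumA (board.getD i []) n > 1 then false else pvRowsA board n rest

-- second for-loop of A, with its early `return False`
def pvColsA (board : List (List Int)) (n : Nat) : List Nat → Bool
  | [] => true
  | c :: rest => if pvColSumA board n c > 1 then false else pvColsA board n rest

def rookSafety (board : List (List Int)) : Bool :=
  let n := board.length
  if pvRowsA board n (List.range n) then pvColsA board n (List.range n) else false

-- ===== PORT B =====
-- inner loop of B: one pass over the columns of `row`, accumulating the pair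
-- (row_count, col_counts)
def pvStepB (n : Nat) (row : List Int) (s : Int × List Int) : Int × List Int :=
  (List.range n).foldl
    (fun s c =>
      let v := row.getD c 0
      (s.1 + v, s.2.set c (s.2.getD c 0 + v))) s

-- outer loop of B over the rows, then the final all() over col_counts
def pvLoopB (n : Nat) : List (List Int) → List Int → Bool
  | [], cc => cc.all (fun v => decide (v ≤ 1))
  | row :: rest, cc =>
      let s := pvStepB n row (0, cc)
      if s.1 > 1 then false else pvLoopB n rest s.2

def rookSafety_alt (board : List (List Int)) : Bool :=
  let n := board.length
  pvLoopB n board (List.replicate n 0)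

-- ===== PRECONDITION & SPEC =====
-- Pre_ excludes ragged boards with a row shorter than len(board): A raises
-- IndexError on them unless an earlier over-full row short-circuits first
-- (on those short-circuited ragged boards B returns the same value as A anyway).
def Pre_rookSafety (board : List (List Int)) : Prop :=
  ∀ row ∈ board, board.length ≤ row.length

instance (board : List (List Int)) : Decidable (Pre_rookSafety board) := by
  unfold Pre_rookSafety; infer_instance

def pvWitness_rookSafety : List (List Int) := [[1, 0], [0, 1]]

def Spec_rookSafety (board : List (List Int)) (out : Bool) : Prop := out = rookSafety_alt board
instance (board : List (List Int)) (out : Bool) : Decidable (Spec_rookSafety board out) := by unfold Spec_rookSafety; infer_instance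

-- ===== CLAIM (what is proved, stated in full; the proofs are below) =====
def Claim_equal_rookSafety : Prop := ∀ (board : List (List Int)), Dom_rookSafety board → Pre_rookSafety board → Spec_rookSafety board (rookSafety board)

-- ===== LEMMAS AND PROOFS =====

-- column-tally update of one row, isolated (the snd-component of pvStepB)
def pvColAdd (n : Nat) (row : List Int) (cc : List Int) : List Int :=
  (List.range n).foldl (fun l c => l.set c (l.getD c 0 + row.getD c 0)) cc

theorem pvStepB_split (row : List Int) (l : List Nat) (a : Int) (cc : List Int) :
    l.foldl (fun s c =>
        let v := row.getD c 0
        ((s.1 + v, s.2.set c (s.2.getD c 0 + v)) : Int × List Int)) (a, cc)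
      = (a + l.foldl (fun acc c => acc + row.getD c 0) 0,
         l.foldl (fun l' c => l'.set c (l'.getD c 0 + row.getD c 0)) cc) := by
  induction l generalizing a cc with
  | nil => simp
  | cons c rest ih =>
      simp only [List.foldl_cons]
      rw [ih]
      congr 1
      have h : rest.foldl (fun acc c => acc + row.getD c 0) (0 + row.getD c 0)
          = (0 + row.getD c 0) + rest.foldl (fun acc c => acc + row.getD c 0) 0 := by
        rw [PySem.List.foldl_add, PySem.List.foldl_add]; ring
      rw [h]; ring

theorem pvStepB_eq (n : Nat) (row : List Int) (a : Int) (cc : List Int) :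
    pvStepB n row (a, cc) = (a + pvRowSumA row n, pvColAdd n row cc) := by
  unfold pvStepB pvRowSumA pvColAdd
  exact pvStepB_split row (List.range n) a cc

theorem pvColAdd_length (n : Nat) (row : List Int) (cc : List Int) :
    (pvColAdd n row cc).length = cc.length := by
  unfold pvColAdd
  induction (List.range n) generalizing cc with
  | nil => rfl
  | cons c rest ih =>
      simp only [List.foldl_cons]
      rw [ih, List.length_set]

theorem pvColAdd_foldl_getD (row : List Int) (l : List Nat) (hl : l.Nodup)
    (cc : List Int) (c : Nat) :
    (l.foldl (fun l' j => l'.set j (l'.getD j 0 + row.getD j 0)) cc).getD c 0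
      = cc.getD c 0 + (if c ∈ l ∧ c < cc.length then row.getD c 0 else 0) := by
  induction l generalizing cc with
  | nil => simp
  | cons j rest ih =>
      simp only [List.foldl_cons]
      have hnd := List.nodup_cons.mp hl
      rw [ih hnd.2]
      by_cases hcj : c = j
      · subst hcj
        have hnotin : c ∉ rest := hnd.1
        by_cases hlt : c < cc.length
        · have hset : (cc.set c (cc.getD c 0 + row.getD c 0)).getD c 0
              = cc.getD c 0 + row.getD c 0 := by
            rw [List.getD_eq_getElem?_getD, List.getElem?_set_self hlt, Option.getD_some]
          rw [hset]
          simp [hnotin, hlt]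
        · have hnone : ∀ v : Int, (cc.set c v)[c]? = none := by
            intro v
            rw [List.getElem?_eq_none]
            simp only [List.length_set]
            omega
          simp only [List.getD_eq_getElem?_getD, List.length_set, hnone,
                List.getElem?_eq_none (show cc.length ≤ c by omega), Option.getD_none]
          simp [hnotin, hlt]
      · have hset : (cc.set j (cc.getD j 0 + row.getD j 0)).getD c 0 = cc.getD c 0 := by
          simp [List.getD_eq_getElem?_getD, List.getElem?_set_ne (show j ≠ c by omega)]
        rw [hset]
        simp [List.mem_cons, hcj]

theorem pvColAdd_getD (n : Nat) (row : List Int) (cc : List Int) (c : Nat)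
    (hc : c < n) (hlen : cc.length = n) :
    (pvColAdd n row cc).getD c 0 = cc.getD c 0 + row.getD c 0 := by
  unfold pvColAdd
  rw [pvColAdd_foldl_getD row (List.range n) (List.nodup_range) cc c]
  simp [List.mem_range, hc, hlen]

-- characterisation of B's outer loop
theorem pvLoopB_char (n : Nat) (rows : List (List Int)) (cc : List Int) :
    pvLoopB n rows cc
      = if rows.all (fun r => decide (pvRowSumA r n ≤ 1))
        then (rows.foldl (fun acc r => pvColAdd n r acc) cc).all (fun v => decide (v ≤ 1))
        else false := by
  induction rows generalizing cc with
  | nil => simp [pvLoopB]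
  | cons row rest ih =>
      simp only [pvLoopB, pvStepB_eq, Int.zero_add, List.all_cons, List.foldl_cons]
      by_cases h : pvRowSumA row n > 1
      · rw [if_pos h]
        have hd : decide (pvRowSumA row n ≤ 1) = false := by
          simp only [decide_eq_false_iff_not]; omega
        rw [hd]
        simp
      · rw [if_neg h, ih]
        have hd : decide (pvRowSumA row n ≤ 1) = true := by
          simp only [decide_eq_true_eq]; omega
        rw [hd, Bool.true_and]

theorem pvRowsA_char (board : List (List Int)) (n : Nat) (l : List Nat) :
    pvRowsA board n l = l.all (fun i => decide (pvRowSumA (board.getD i []) n ≤ 1)) := by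
  induction l with
  | nil => rfl
  | cons i rest ih =>
      simp only [pvRowsA, List.all_cons, ih]
      by_cases h : pvRowSumA (board.getD i []) n > 1
      · rw [if_pos h]
        have hd : decide (pvRowSumA (board.getD i []) n ≤ 1) = false := by
          simp only [decide_eq_false_iff_not]; omega
        rw [hd, Bool.false_and]
      · rw [if_neg h]
        have hd : decide (pvRowSumA (board.getD i []) n ≤ 1) = true := by
          simp only [decide_eq_true_eq]; omega
        rw [hd, Bool.true_and]

theorem pvColsA_char (board : List (List Int)) (n : Nat) (l : List Nat) :
    pvColsA board n l = l.all (fun c => decide (pvColSumA board n c ≤ 1)) := by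
  induction l with
  | nil => rfl
  | cons c rest ih =>
      simp only [pvColsA, List.all_cons, ih]
      by_cases h : pvColSumA board n c > 1
      · rw [if_pos h]
        have hd : decide (pvColSumA board n c ≤ 1) = false := by
          simp only [decide_eq_false_iff_not]; omega
        rw [hd, Bool.false_and]
      · rw [if_neg h]
        have hd : decide (pvColSumA board n c ≤ 1) = true := by
          simp only [decide_eq_true_eq]; omega
        rw [hd, Bool.true_and]

-- the accumulated column tallies equal A's column sums
theorem pvFold_colAdd_length (n : Nat) (rows : List (List Int)) (cc : List Int) :
    (rows.foldl (fun acc r => pvColAdd n r acc) cc).length = cc.length := by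
  induction rows generalizing cc with
  | nil => rfl
  | cons r rest ih => simp [List.foldl_cons, ih, pvColAdd_length]

theorem pvFold_colAdd_getD (n : Nat) (rows : List (List Int)) (cc : List Int)
    (c : Nat) (hc : c < n) (hlen : cc.length = n) :
    (rows.foldl (fun acc r => pvColAdd n r acc) cc).getD c 0
      = cc.getD c 0 + (rows.map (fun r => r.getD c 0)).sum := by
  induction rows generalizing cc with
  | nil => simp
  | cons r rest ih =>
      simp only [List.foldl_cons, List.map_cons, List.sum_cons]
      rw [ih (pvColAdd n r cc) (by rw [pvColAdd_length]; exact hlen),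
          pvColAdd_getD n r cc c hc hlen]
      ring

theorem pvColSumA_eq_sum (board : List (List Int)) (c : Nat) :
    pvColSumA board board.length c
      = (board.map (fun r => r.getD c 0)).sum := by
  unfold pvColSumA
  rw [PySem.List.foldl_add, Int.zero_add]
  congr 1
  apply List.ext_getElem
  · simp
  · intro i h1 h2
    have hi : i < board.length := by simpa using h1
    simp [List.getD_eq_getElem?_getD, List.getElem?_eq_getElem hi]

-- ===== VERDICT (by name: the statement is the Claim_ definition above) =====
theorem rookSafety_spec : Claim_equal_rookSafety := by
  intro board _ _
  unfold Spec_rookSafety rookSafety rookSafety_alt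
  show (if pvRowsA board board.length (List.range board.length) = true
        then pvColsA board board.length (List.range board.length) else false)
      = pvLoopB board.length board (List.replicate board.length 0)
  rw [pvRowsA_char, pvLoopB_char]
  have hrows : (List.range board.length).all
        (fun i => decide (pvRowSumA (board.getD i []) board.length ≤ 1))
      = board.all (fun r => decide (pvRowSumA r board.length ≤ 1)) := by
    rw [Bool.eq_iff_iff]
    simp only [List.all_eq_true, List.mem_range]
    constructor
    · intro h r hr
      obtain ⟨i, hi, rfl⟩ := List.mem_iff_getElem.mp hr
      have := h i hi
      simpa [List.getD_eq_getElem?_getD, List.getElem?_eq_getElem hi] using this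
    · intro h i hi
      have : board.getD i [] ∈ board := by
        rw [List.getD_eq_getElem?_getD, List.getElem?_eq_getElem hi]
        exact List.getElem_mem hi
      exact h _ this
  rw [hrows]
  by_cases hall : board.all (fun r => decide (pvRowSumA r board.length ≤ 1))
  · simp only [hall, if_true]
    rw [pvColsA_char, Bool.eq_iff_iff]
    have hlenf : (board.foldl (fun acc r => pvColAdd board.length r acc)
        (List.replicate board.length 0)).length = board.length := by
      rw [pvFold_colAdd_length]; simp
    simp only [List.all_eq_true, List.mem_range]
    constructor
    · intro h v hv
      obtain ⟨c, hc, rfl⟩ := List.mem_iff_getElem.mp hv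
      have hc' : c < board.length := by rwa [hlenf] at hc
      have := h c hc'
      have hget : (board.foldl (fun acc r => pvColAdd board.length r acc)
            (List.replicate board.length 0)).getD c 0
          = pvColSumA board board.length c := by
        rw [pvFold_colAdd_getD board.length board _ c hc' (by simp),
            pvColSumA_eq_sum]
        simp
      rw [List.getD_eq_getElem?_getD, List.getElem?_eq_getElem hc] at hget
      simp only [Option.getD_some] at hget
      rw [hget]
      exact this
    · intro h c hc
      have hget : (board.foldl (fun acc r => pvColAdd board.length r acc)
            (List.replicate board.length 0)).getD c 0
          = pvColSumA board board.length c := by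
        rw [pvFold_colAdd_getD board.length board _ c hc (by simp),
            pvColSumA_eq_sum]
        simp
      have hmem : (board.foldl (fun acc r => pvColAdd board.length r acc)
            (List.replicate board.length 0)).getD c 0
          ∈ board.foldl (fun acc r => pvColAdd board.length r acc)
            (List.replicate board.length 0) := by
        rw [List.getD_eq_getElem?_getD,
            List.getElem?_eq_getElem (by rwa [hlenf])]
        exact List.getElem_mem _
      have := h _ hmem
      rwa [hget] at this
  · simp [hall]
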